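-- pv_equiv track=rewrite | github.com/louisfghbvc/Leetcode | Prefix/1983. [Like] Widest Pair of Indices With Equal Range Sum.py | widestPairOfIndices
-- ===== SOURCE A (Python) =====
-- from typing import List
--
-- def widestPairOfIndices(nums1: List[int], nums2: List[int]) -> int:
--     res, prev = 0, 0
--     mp = {0: -1}
--     # use a mp to record index of same diff
--     for i in range(len(nums1)):
--         prev += nums1[i] - nums2[i]
--         if prev in mp:
--             res = max(res, i - mp[prev])
--         else:
--             mp[prev] = i
--     return res
-- ===== SOURCE B (Python) =====
-- from typing import List
--
-- def widestPairOfIndices(nums1: List[int], nums2: List[int]) -> int: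
--     # Sort-then-scan: collect prefix-difference points (value, index), seeded
--     # with (0, -1); a stable sort by value makes equal values contiguous while
--     # keeping their indices increasing, so the widest pair per value is
--     # (index - first index of its run).
--     pts = [(0, -1)]
--     prev = 0
--     for i, (a, b) in enumerate(zip(nums1, nums2)):
--         prev += a - b
--         pts.append((prev, i))
--     pts.sort(key=lambda p: p[0])
--     res = 0
--     cur = None
--     for v, i in pts:
--         if cur is not None and v == cur[0]:
--             res = max(res, i - cur[1])
--         else:
--             cur = (v, i)
--     return res
-- ===== Notes on version B (the rewrite author's own statement) =====
-- stated objective: alternative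
-- what changed: B abandons A's one-pass hashmap of first occurrences: it materializes all prefix-difference points (value, index) seeded with (0,-1), stable-sorts them by value so equal values form contiguous runs with increasing indices, and scans the sorted list taking max(index - run-first-index) per run.
import Mathlib
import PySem

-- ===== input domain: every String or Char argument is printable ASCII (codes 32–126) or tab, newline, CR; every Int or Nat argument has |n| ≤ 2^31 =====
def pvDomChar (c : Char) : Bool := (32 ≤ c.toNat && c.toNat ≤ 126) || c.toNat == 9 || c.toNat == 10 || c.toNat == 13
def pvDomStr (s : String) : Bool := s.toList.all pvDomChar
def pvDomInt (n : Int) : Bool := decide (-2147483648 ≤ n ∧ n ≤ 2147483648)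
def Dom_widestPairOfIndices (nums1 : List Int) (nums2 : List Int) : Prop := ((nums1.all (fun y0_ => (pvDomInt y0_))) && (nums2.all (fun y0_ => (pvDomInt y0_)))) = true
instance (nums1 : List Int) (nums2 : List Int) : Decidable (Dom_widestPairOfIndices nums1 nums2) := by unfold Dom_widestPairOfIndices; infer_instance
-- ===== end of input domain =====

-- B replaces A's one-pass first-occurrence hashmap by sort-then-scan: it materializes the
-- prefix-difference points (value, index), stable-sorts them by value and scans the runs;
-- objective: alternative (a genuinely different algorithm of similar size, not faster).

-- ===== PORT A =====
-- nums1[i] / nums2[i] ported with pyGetD: Pre_ guarantees 0 ≤ i < length of both lists,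
-- where pyGetD agrees exactly with Python's indexing (out of range = the excluded IndexError).
def widestPairOfIndices (nums1 : List Int) (nums2 : List Int) : Int :=
  let st := (PySem.List.pyRange 0 (nums1.length : Int) 1).foldl
    (fun (st : Int × Int × PySem.Dict Int Int) i =>
      let prev := st.2.1 + PySem.List.pyGetD nums1 i 0 - PySem.List.pyGetD nums2 i 0
      if st.2.2.contains prev then
        (max st.1 (i - st.2.2.getD prev 0), prev, st.2.2)
      else
        (st.1, prev, st.2.2.insert prev i))
    (0, 0, (PySem.Dict.empty : PySem.Dict Int Int).insert 0 (-1))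
  st.1

-- ===== PORT B =====
def widestPairOfIndices_alt (nums1 : List Int) (nums2 : List Int) : Int :=
  -- pts = [(0, -1)]; for i, (a, b) in enumerate(zip(...)): prev += a - b; pts.append((prev, i))
  let built := (PySem.List.enumerate (nums1.zip nums2) 0).foldl
    (fun (st : List (Int × Int) × Int) p =>
      let prev := st.2 + p.2.1 - p.2.2
      (st.1 ++ [(prev, p.1)], prev))
    ([(0, -1)], 0)
  -- pts.sort(key=lambda p: p[0])
  let s := PySem.List.sorted built.1 (fun p => p.1) false
  -- scan: res = 0; cur = None; for v, i in s: ...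
  let fin := s.foldl
    (fun (st : Int × Option (Int × Int)) q =>
      match st.2 with
      | some c => if q.1 == c.1 then (max st.1 (q.2 - c.2), st.2) else (st.1, some q)
      | none => (st.1, some q))
    (0, none)
  fin.1

-- ===== PRECONDITION & SPEC =====
-- A indexes nums2 by every i < len(nums1), so it raises IndexError when nums1 is longer.
def Pre_widestPairOfIndices (nums1 : List Int) (nums2 : List Int) : Prop :=
  nums1.length ≤ nums2.length
instance (nums1 : List Int) (nums2 : List Int) : Decidable (Pre_widestPairOfIndices nums1 nums2) := by unfold Pre_widestPairOfIndices; infer_instance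
def pvWitness_widestPairOfIndices : List Int × List Int := ([1, 2, 1], [2, 1, 2])

def Spec_widestPairOfIndices (nums1 : List Int) (nums2 : List Int) (out : Int) : Prop := out = widestPairOfIndices_alt nums1 nums2
instance (nums1 : List Int) (nums2 : List Int) (out : Int) : Decidable (Spec_widestPairOfIndices nums1 nums2 out) := by unfold Spec_widestPairOfIndices; infer_instance

-- ===== CLAIM (what is proved, stated in full; the proofs are below) =====
def Claim_equal_widestPairOfIndices : Prop := ∀ (nums1 : List Int) (nums2 : List Int), Dom_widestPairOfIndices nums1 nums2 → Pre_widestPairOfIndices nums1 nums2 → Spec_widestPairOfIndices nums1 nums2 (widestPairOfIndices nums1 nums2)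

-- ===== LEMMAS AND PROOFS =====

-- the prefix-difference points (value, index) generated from the zipped list, given the
-- running sum `prev` and the next index `s`
def wpoiVP : List (Int × Int) → Int → Int → List (Int × Int)
  | [], _, _ => []
  | p :: t, prev, s => (prev + p.1 - p.2, s) :: wpoiVP t (prev + p.1 - p.2) (s + 1)

-- A's loop rephrased on (value, index) pairs with the running sum folded away
def wpoiFoldA : List (Int × Int) → Int → PySem.Dict Int Int → Int
  | [], res, _ => res
  | q :: t, res, mp =>
    if mp.contains q.1 then wpoiFoldA t (max res (q.2 - mp.getD q.1 0)) mp
    else wpoiFoldA t res (mp.insert q.1 q.2)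

-- A's loop body on enumerated (value1, value2) pairs
def wpoiStepA (st : Int × Int × PySem.Dict Int Int) (p : Int × (Int × Int)) :
    Int × Int × PySem.Dict Int Int :=
  let prev := st.2.1 + p.2.1 - p.2.2
  if st.2.2.contains prev then
    (max st.1 (p.1 - st.2.2.getD prev 0), prev, st.2.2)
  else
    (st.1, prev, st.2.2.insert prev p.1)

-- B's scan body
def wpoiStepB (st : Int × Option (Int × Int)) (q : Int × Int) : Int × Option (Int × Int) :=
  match st.2 with
  | some c => if q.1 == c.1 then (max st.1 (q.2 - c.2), st.2) else (st.1, some q)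
  | none => (st.1, some q)

-- index of the first point with a given value (0 if absent)
def wpoiFst (l : List (Int × Int)) (v : Int) : Int :=
  match l.find? (fun q => q.1 == v) with
  | some q => q.2
  | none => 0

-- the common normal form: running maximum of (index - first index of the value)
def wpoiTermFold (f : Int → Int) (l : List (Int × Int)) (res : Int) : Int :=
  l.foldl (fun r q => max r (q.2 - f q.1)) res

theorem wpoiTermFold_cons (f : Int → Int) (q : Int × Int) (t : List (Int × Int)) (res : Int) :
    wpoiTermFold f (q :: t) res = wpoiTermFold f t (max res (q.2 - f q.1)) := rfl

-- A's index loop over range(len(nums1)) is the pair loop over enumerate(zip(nums1, nums2))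
theorem wpoi_bridge (nums1 nums2 : List Int) (h : nums1.length ≤ nums2.length)
    (init : Int × Int × PySem.Dict Int Int) :
    (PySem.List.pyRange 0 (nums1.length : Int) 1).foldl
      (fun (st : Int × Int × PySem.Dict Int Int) i =>
        let prev := st.2.1 + PySem.List.pyGetD nums1 i 0 - PySem.List.pyGetD nums2 i 0
        if st.2.2.contains prev then
          (max st.1 (i - st.2.2.getD prev 0), prev, st.2.2)
        else
          (st.1, prev, st.2.2.insert prev i)) init
    = (PySem.List.enumerate (nums1.zip nums2) 0).foldl wpoiStepA init := by
  have hlen : (nums1.zip nums2).length = nums1.length := by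
    rw [List.length_zip]; omega
  rw [PySem.List.enumerate_eq_map_pyRange (nums1.zip nums2) (0, 0)]
  have hlen' : PySem.List.len (nums1.zip nums2) = (nums1.length : Int) := by
    simp [PySem.List.len, hlen]
  rw [hlen', List.foldl_map]
  apply PySem.List.foldl_congr_mem
  intro st i hi
  obtain ⟨hi0, hi1⟩ := PySem.List.mem_pyRange_one.mp hi
  have hiz : i < ((nums1.zip nums2).length : Int) := by omega
  have hi2 : i < (nums2.length : Int) := by
    have h' : (nums1.length : Int) ≤ (nums2.length : Int) := by exact_mod_cast h
    omega
  rw [PySem.List.pyGetD_eq_getElem (nums1.zip nums2) (0, 0) hi0 hiz]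
  have hzip : (nums1.zip nums2)[i.toNat] = (nums1[i.toNat], nums2[i.toNat]) := by
    apply List.getElem_zip
  simp only [wpoiStepA, hzip,
    PySem.List.pyGetD_eq_getElem nums1 0 hi0 hi1,
    PySem.List.pyGetD_eq_getElem nums2 0 hi0 hi2]

-- the enumerate-zip fold with running sum is wpoiFoldA over the value pairs
theorem wpoi_foldA_of_enum (l : List (Int × Int)) :
    ∀ (s res prev : Int) (mp : PySem.Dict Int Int),
    ((PySem.List.enumerate l s).foldl wpoiStepA (res, prev, mp)).1
      = wpoiFoldA (wpoiVP l prev s) res mp := by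
  induction l with
  | nil => intro s res prev mp; simp [PySem.List.enumerate, wpoiVP, wpoiFoldA]
  | cons p t ih =>
      intro s res prev mp
      rw [PySem.List.enumerate_cons]
      simp only [List.foldl_cons, wpoiVP, wpoiFoldA]
      by_cases h : mp.contains (prev + p.1 - p.2) = true
      · simp only [wpoiStepA, h, if_true]
        exact ih (s + 1) _ (prev + p.1 - p.2) mp
      · simp only [wpoiStepA, h, if_false, Bool.false_eq_true]
        exact ih (s + 1) res (prev + p.1 - p.2) _

-- B's append loop builds exactly the seeded value-pair list
theorem wpoi_build (l : List (Int × Int)) :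
    ∀ (s prev : Int) (acc : List (Int × Int)),
    ((PySem.List.enumerate l s).foldl
      (fun (st : List (Int × Int) × Int) p =>
        (st.1 ++ [(st.2 + p.2.1 - p.2.2, p.1)], st.2 + p.2.1 - p.2.2)) (acc, prev)).1
      = acc ++ wpoiVP l prev s := by
  induction l with
  | nil => intro s prev acc; simp [PySem.List.enumerate, wpoiVP]
  | cons p t ih =>
      intro s prev acc
      rw [PySem.List.enumerate_cons]
      simp only [List.foldl_cons, wpoiVP]
      rw [ih (s + 1) (prev + p.1 - p.2) (acc ++ [(prev + p.1 - p.2, s)])]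
      simp

-- A's fold computes the running maximum of (index - f value), for any f that names the
-- first occurrence index of each value not yet in the map
theorem wpoi_foldA_eq_termFold (f : Int → Int) :
    ∀ (t : List (Int × Int)) (res : Int) (mp : PySem.Dict Int Int), 0 ≤ res →
    (∀ v, mp.contains v = true → mp.getD v 0 = f v) →
    (∀ v q, mp.contains v = false → t.find? (fun p => p.1 == v) = some q → f v = q.2) →
    wpoiFoldA t res mp = wpoiTermFold f t res := by
  intro t
  induction t with
  | nil => intro res mp _ _ _; rfl
  | cons q t ih =>
      intro res mp hres h1 h2
      rw [wpoiTermFold_cons]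
      by_cases hc : mp.contains q.1 = true
      · rw [wpoiFoldA, if_pos hc, h1 q.1 hc]
        apply ih _ _ (le_trans hres (le_max_left _ _)) h1
        intro v q' hv hf
        by_cases hvq : q.1 = v
        · rw [← hvq] at hv; rw [hv] at hc; exact absurd hc (by simp)
        · exact h2 v q' hv (by rw [List.find?_cons_of_neg (by simp [hvq]), hf])
      · have hc' : mp.contains q.1 = false := by simpa using hc
        have hfq : f q.1 = q.2 :=
          h2 q.1 q hc' (by rw [List.find?_cons_of_pos (by simp)])
        rw [wpoiFoldA, if_neg hc, hfq]
        rw [show max res (q.2 - q.2) = res by rw [sub_self]; exact max_eq_left hres]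
        apply ih _ _ hres
        · intro v hv
          by_cases hvq : v = q.1
          · subst hvq; rw [PySem.Dict.getD_insert_self, hfq]
          · rw [PySem.Dict.getD_insert, if_neg hvq]
            apply h1
            rw [PySem.Dict.contains_eq_isSome_get?] at hv ⊢
            rwa [PySem.Dict.get?_insert_of_ne _ _ hvq] at hv
        · intro v q' hv hf
          by_cases hvq : v = q.1
          · subst hvq
            rw [PySem.Dict.contains_eq_isSome_get?, PySem.Dict.get?_insert_self] at hv
            exact absurd hv (by simp)
          · apply h2 v q'
            · rw [PySem.Dict.contains_eq_isSome_get?] at hv ⊢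
              rwa [PySem.Dict.get?_insert_of_ne _ _ hvq] at hv
            · rw [List.find?_cons_of_neg (by simp; exact fun h => hvq h.symm), hf]

-- B's scan computes the same running maximum over a value-sorted list
theorem wpoi_scan_eq_termFold (f : Int → Int) :
    ∀ (t : List (Int × Int)) (res cv ci : Int), 0 ≤ res → f cv = ci →
    (∀ v q, v ≠ cv → t.find? (fun p => p.1 == v) = some q → f v = q.2) →
    List.Pairwise (fun p q => p.1 ≤ q.1) t → (∀ q ∈ t, cv ≤ q.1) →
    (t.foldl wpoiStepB (res, some (cv, ci))).1 = wpoiTermFold f t res := by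
  intro t
  induction t with
  | nil => intro res cv ci _ _ _ _ _; rfl
  | cons q t ih =>
      intro res cv ci hres hci h2 hpw hlb
      rw [List.foldl_cons, wpoiTermFold_cons]
      rw [List.pairwise_cons] at hpw
      by_cases hv : q.1 = cv
      · have hfq : f q.1 = ci := by rw [hv, hci]
        have hstep : wpoiStepB (res, some (cv, ci)) q = (max res (q.2 - ci), some (cv, ci)) := by
          simp [wpoiStepB, hv]
        rw [hstep, hfq]
        apply ih _ _ _ (le_trans hres (le_max_left _ _)) hci
        · intro v q' hvne hf
          apply h2 v q' hvne
          rw [List.find?_cons_of_neg (by simp [hv]; exact fun h => hvne h.symm), hf]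
        · exact hpw.2
        · intro q' hq'; rw [← hv]; exact hpw.1 q' hq'
      · have hlt : cv < q.1 := lt_of_le_of_ne (hlb q (by simp)) (fun h => hv h.symm)
        have hfq : f q.1 = q.2 :=
          h2 q.1 q hv (by rw [List.find?_cons_of_pos (by simp)])
        have hstep : wpoiStepB (res, some (cv, ci)) q = (res, some q) := by
          simp [wpoiStepB, hv]
        rw [hstep, hfq]
        rw [show max res (q.2 - q.2) = res by rw [sub_self]; exact max_eq_left hres]
        have hq12 : q = (q.1, q.2) := rfl
        rw [hq12]
        apply ih res q.1 q.2 hres hfq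
        · intro v q' hvne hf
          by_cases hvcv : v = cv
          · exfalso
            have hm := List.mem_of_find?_eq_some hf
            have hp := List.find?_some hf
            have : cv < q'.1 := lt_of_lt_of_le hlt (hpw.1 q' hm)
            rw [hvcv] at hp
            simp at hp
            omega
          · apply h2 v q' hvcv
            rw [List.find?_cons_of_neg (by simp; exact fun h => hvne h.symm), hf]
        · exact hpw.2
        · exact hpw.1

-- inserting into a key-sorted list keeps it key-sorted
theorem wpoi_insertBy_pairwise (key : Int × Int → Int) (x : Int × Int) :
    ∀ (ys : List (Int × Int)), List.Pairwise (fun a b => key a ≤ key b) ys →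
    List.Pairwise (fun a b => key a ≤ key b)
      (PySem.List.insertBy (fun a b => decide (key a < key b)) x ys) := by
  intro ys
  induction ys with
  | nil => intro _; simp [PySem.List.insertBy]
  | cons y ys ih =>
      intro hpw
      rw [List.pairwise_cons] at hpw
      by_cases h : key x < key y
      · rw [PySem.List.insertBy, if_pos (by simpa using h)]
        refine List.pairwise_cons.mpr ⟨?_, List.pairwise_cons.mpr hpw⟩
        intro b hb
        rcases List.mem_cons.mp hb with hb | hb
        · rw [hb]; exact le_of_lt h
        · exact le_trans (le_of_lt h) (hpw.1 b hb)
      · rw [PySem.List.insertBy, if_neg (by simpa using h)]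
        refine List.pairwise_cons.mpr ⟨?_, ih hpw.2⟩
        intro b hb
        rcases (PySem.List.mem_insertBy _ _ _ _).mp hb with hb | hb
        · rw [hb]; exact le_of_not_gt h
        · exact hpw.1 b hb

-- stability of insertion: the equal-key sublist gains x at its end
theorem wpoi_insertBy_filter (key : Int × Int → Int) (v : Int) (x : Int × Int) :
    ∀ (ys : List (Int × Int)), List.Pairwise (fun a b => key a ≤ key b) ys →
    (PySem.List.insertBy (fun a b => decide (key a < key b)) x ys).filter
        (fun y => key y == v)
      = if key x = v then ys.filter (fun y => key y == v) ++ [x]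
        else ys.filter (fun y => key y == v) := by
  intro ys
  induction ys with
  | nil =>
      intro _
      by_cases h : key x = v <;> simp [PySem.List.insertBy, List.filter, h]
  | cons y ys ih =>
      intro hpw
      rw [List.pairwise_cons] at hpw
      by_cases h : key x < key y
      · rw [PySem.List.insertBy, if_pos (by simpa using h)]
        by_cases hxv : key x = v
        · have hys : (y :: ys).filter (fun z => key z == v) = [] := by
            rw [List.filter_eq_nil_iff]
            intro a ha
            rcases List.mem_cons.mp ha with ha | ha
            · subst ha; simp only [beq_iff_eq]; omega
            · have := hpw.1 a ha; simp only [beq_iff_eq]; omega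
          rw [if_pos hxv, hys, List.filter_cons_of_pos (by simp [hxv]), hys]
          rfl
        · rw [if_neg hxv, List.filter_cons_of_neg (by simp [hxv])]
      · rw [PySem.List.insertBy, if_neg (by simpa using h)]
        rw [List.filter_cons, ih hpw.2, List.filter_cons]
        split_ifs <;> simp
  
-- the stable sort preserves each equal-key sublist
theorem wpoi_sorted_filter (key : Int × Int → Int) (l : List (Int × Int)) (v : Int) :
    (PySem.List.sorted l key false).filter (fun y => key y == v)
      = l.filter (fun y => key y == v) := by
  rw [PySem.List.sorted_eq_foldl_insertBy]
  suffices h : ∀ (l acc : List (Int × Int)), List.Pairwise (fun a b => key a ≤ key b) acc →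
      (l.foldl (fun acc x => PySem.List.insertBy (fun a b => decide (key a < key b)) x acc)
        acc).filter (fun y => key y == v)
      = acc.filter (fun y => key y == v) ++ l.filter (fun y => key y == v) by
    simpa using h l [] (List.Pairwise.nil)
  intro l
  induction l with
  | nil => intro acc _; simp
  | cons x t ih =>
      intro acc hpw
      rw [List.foldl_cons, ih _ (wpoi_insertBy_pairwise key x acc hpw),
        wpoi_insertBy_filter key v x acc hpw, List.filter_cons]
      by_cases hxv : key x = v
      · rw [if_pos hxv, if_pos (by simp [hxv])]
        simp
      · rw [if_neg hxv, if_neg (by simp [hxv])]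

-- hence first occurrences agree between the list and its stable sort
theorem wpoi_fst_sorted (l : List (Int × Int)) (v : Int) :
    wpoiFst (PySem.List.sorted l (fun p => p.1) false) v = wpoiFst l v := by
  unfold wpoiFst
  rw [← List.head?_filter, ← List.head?_filter,
    wpoi_sorted_filter (fun p => p.1) l v]

-- the running maximum is permutation invariant (max is right-commutative)
theorem wpoi_termFold_perm (f : Int → Int) (l l' : List (Int × Int)) (h : l.Perm l')
    (res : Int) : wpoiTermFold f l res = wpoiTermFold f l' res := by
  unfold wpoiTermFold
  haveI : RightCommutative (fun (r : Int) (q : Int × Int) => max r (q.2 - f q.1)) :=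
    ⟨fun r a b => max_right_comm r _ _⟩
  exact h.foldl_eq res

-- ===== VERDICT (by name: the statement is the Claim_ definition above) =====
theorem widestPairOfIndices_spec : Claim_equal_widestPairOfIndices := by
  intro nums1 nums2 _ hpre
  unfold Spec_widestPairOfIndices
  simp only [widestPairOfIndices, widestPairOfIndices_alt]
  rw [wpoi_bridge nums1 nums2 hpre, wpoi_foldA_of_enum, wpoi_build]
  set pts : List (Int × Int) := (0, -1) :: wpoiVP (nums1.zip nums2) 0 0 with hpts
  have hcat : [((0 : Int), (-1 : Int))] ++ wpoiVP (nums1.zip nums2) 0 0 = pts := rfl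
  rw [hcat]
  have hlam : (fun (st : Int × Option (Int × Int)) q =>
      match st.2 with
      | some c => if q.1 == c.1 then (max st.1 (q.2 - c.2), st.2) else (st.1, some q)
      | none => (st.1, some q)) = wpoiStepB := rfl
  rw [hlam]
  -- name the sorted list and split off its head
  have hpne : pts ≠ [] := by rw [hpts]; simp
  rcases hs : PySem.List.sorted pts (fun p => p.1) false with _ | ⟨⟨v0, i0⟩, t⟩
  · exact absurd ((PySem.List.sorted_eq_nil_iff pts (fun p => p.1) false).mp hs) hpne
  · have hperm : pts.Perm ((v0, i0) :: t) := by
      rw [← hs]; exact (PySem.List.sorted_perm pts (fun p => p.1) false).symm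
    have hpw : List.Pairwise (fun (p q : Int × Int) => p.1 ≤ q.1) ((v0, i0) :: t) := by
      rw [← hs]; exact PySem.List.sorted_pairwise pts (fun p => p.1)
    rw [List.pairwise_cons] at hpw
    set f : Int → Int := wpoiFst ((v0, i0) :: t) with hf
    have h0 : wpoiFoldA (wpoiVP (nums1.zip nums2) 0 0) 0
        ((PySem.Dict.empty : PySem.Dict Int Int).insert 0 (-1))
        = wpoiFoldA pts 0 PySem.Dict.empty := by
      rw [hpts]
      simp only [wpoiFoldA]
      simp [PySem.Dict.contains_empty]
    rw [h0]
    -- A's side: the map fold is the running maximum with f = first occurrence in pts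
    have hA : wpoiFoldA pts 0 PySem.Dict.empty = wpoiTermFold f pts 0 := by
      have hfst : ∀ v q, pts.find? (fun p => p.1 == v) = some q → wpoiFst pts v = q.2 := by
        intro v q hq; rw [wpoiFst, hq]
      have hfeq : ∀ v, f v = wpoiFst pts v := by
        intro v
        rw [hf, ← hs, wpoi_fst_sorted]
      rw [wpoi_foldA_eq_termFold (wpoiFst pts) pts 0 PySem.Dict.empty le_rfl
        (by intro v hv; rw [PySem.Dict.contains_empty] at hv; exact absurd hv (by simp))
        (fun v q _ hq => hfst v q hq)]
      unfold wpoiTermFold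
      exact PySem.List.foldl_congr_mem _ _ _ _ (by intro acc q _; rw [hfeq q.1])
    rw [hA]
    -- B's side: the scan over the sorted list is the same running maximum
    have hfv0 : f v0 = i0 := by
      rw [hf, wpoiFst, List.find?_cons_of_pos (by simp)]
    have hB : (((v0, i0) :: t).foldl wpoiStepB (0, none)).1
        = wpoiTermFold f ((v0, i0) :: t) 0 := by
      rw [List.foldl_cons]
      have hstep : wpoiStepB (0, none) (v0, i0) = (0, some (v0, i0)) := rfl
      rw [hstep, wpoiTermFold_cons, hfv0,
        show max 0 (i0 - i0) = 0 by rw [sub_self, max_self]]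
      apply wpoi_scan_eq_termFold f t 0 v0 i0 le_rfl hfv0
      · intro v q hvne hq
        rw [hf, wpoiFst, List.find?_cons_of_neg (by simp; exact fun h => hvne h.symm), hq]
      · exact hpw.2
      · exact hpw.1
    rw [hB]
    exact wpoi_termFold_perm f pts ((v0, i0) :: t) hperm 0
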